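-- pv_equiv track=rewrite | github.com/xtlfn/SPMAVis | file_converter.py | _parse_csv_semicolon
-- ===== SOURCE A (Python) =====
-- def _parse_csv_semicolon(content_str):
-- # semicolon
--     lines = content_str.strip().split("\n")
--     if not lines:
--         return None
--     spmf_lines = []
--     for line in lines:
--         if ";" not in line:
--             return None
--         items = line.split(";")
--         spmf_lines.append(" ".join(items) + " -1")
--     return "\n".join(spmf_lines)
-- ===== SOURCE B (Python) =====
-- def _parse_csv_semicolon(content_str):
--     # Single character-level scan (state machine) instead of splitting into lines:
--     # map ';' -> ' ', insert ' -1' at each line boundary, track per-line ';' presence.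
--     out = []
--     seen = False
--     for ch in content_str.strip():
--         if ch == ';':
--             seen = True
--             out.append(' ')
--         elif ch == '\n':
--             if not seen:
--                 return None
--             out.append(' -1\n')
--             seen = False
--         else:
--             out.append(ch)
--     if not seen:
--         return None
--     return ''.join(out) + ' -1'
-- ===== Notes on version B (the rewrite author's own statement) =====
-- stated objective: alternative
-- what changed: A splits into lines and loops over them splitting each line on ';' with an accumulator and early return; B never builds lines at all: it runs a single character-level state machine over the stripped string, mapping ';' to ' ', emitting ' -1' at each newline/end, and tracking a per-line seen-semicolon flag.
import Mathlib
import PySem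

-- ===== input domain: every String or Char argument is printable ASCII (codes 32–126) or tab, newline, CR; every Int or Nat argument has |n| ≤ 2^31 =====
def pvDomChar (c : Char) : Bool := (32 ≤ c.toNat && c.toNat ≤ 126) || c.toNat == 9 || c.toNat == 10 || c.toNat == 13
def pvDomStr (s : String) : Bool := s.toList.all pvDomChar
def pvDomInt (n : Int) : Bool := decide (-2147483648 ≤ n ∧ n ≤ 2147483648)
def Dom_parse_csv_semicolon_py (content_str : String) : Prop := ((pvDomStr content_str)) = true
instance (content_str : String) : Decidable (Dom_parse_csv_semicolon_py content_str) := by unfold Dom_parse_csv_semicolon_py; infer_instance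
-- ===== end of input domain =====

-- B replaces A's split-into-lines loop by a single character-level state machine over the
-- stripped string (map ';' to ' ', emit ' -1' at line boundaries, per-line seen flag);
-- objective: alternative.

-- ===== PORT A =====
-- A's for-loop over `lines` with `spmf_lines` accumulator and early `return None`.
def parseCsvGoA : List (List Char) → List (List Char) → Option String
  | [], spmf_lines => some (String.ofList (PySem.Chars.join ['\n'] spmf_lines))
  | line :: rest, spmf_lines =>
    if PySem.Chars.isIn [';'] line = false then none
    else parseCsvGoA rest
      (spmf_lines ++ [PySem.Chars.join [' '] (PySem.Chars.splitOn line [';']) ++ [' ', '-', '1']])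

def parse_csv_semicolon_py (content_str : String) : Option String :=
  let lines := PySem.Chars.splitOn (PySem.Chars.strip content_str.toList) ['\n']
  if lines.isEmpty then none
  else parseCsvGoA lines []

-- ===== PORT B =====
-- B's character scan: state = output accumulator `acc` + per-line `seen` (';' seen) flag.
def parseCsvGoB : List Char → Bool → List Char → Option (List Char)
  | [], seen, acc => if seen then some (acc ++ [' ', '-', '1']) else none
  | c :: rest, seen, acc =>
    if c = ';' then parseCsvGoB rest true (acc ++ [' '])
    else if c = '\n' then
      if seen then parseCsvGoB rest false (acc ++ [' ', '-', '1', '\n']) else none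
    else parseCsvGoB rest seen (acc ++ [c])

def parse_csv_semicolon_py_alt (content_str : String) : Option String :=
  (parseCsvGoB (PySem.Chars.strip content_str.toList) false []).map String.ofList

-- ===== PRECONDITION & SPEC =====
def Spec_parse_csv_semicolon_py (content_str : String) (out : Option String) : Prop := out = parse_csv_semicolon_py_alt content_str
instance (content_str : String) (out : Option String) : Decidable (Spec_parse_csv_semicolon_py content_str out) := by unfold Spec_parse_csv_semicolon_py; infer_instance

-- ===== CLAIM (what is proved, stated in full; the proofs are below) =====
def Claim_equal_parse_csv_semicolon_py : Prop := ∀ (content_str : String), Dom_parse_csv_semicolon_py content_str → Spec_parse_csv_semicolon_py content_str (parse_csv_semicolon_py content_str)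

-- ===== LEMMAS AND PROOFS =====

-- structural version of splitOn on a single-char separator
def splitP (a : Char) : List Char → List (List Char)
  | [] => [[]]
  | c :: t =>
    if c = a then [] :: splitP a t
    else
      match splitP a t with
      | [] => [[c]]
      | h :: tl => (c :: h) :: tl

lemma splitP_ne_nil (a : Char) (l : List Char) : splitP a l ≠ [] := by
  cases l with
  | nil => simp [splitP]
  | cons c t =>
    simp only [splitP]
    split
    · simp
    · split <;> simp

lemma splitOn_go_eq_splitP (a : Char) :
    ∀ (l : List Char) (fuel : Nat) (cur : List Char) (acc : List (List Char)),
      l.length ≤ fuel →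
      PySem.Chars.splitOn.go [a] fuel l cur acc
        = acc.reverse ++ ((cur.reverse ++ (splitP a l).headI) :: (splitP a l).tail) := by
  intro l
  induction l with
  | nil =>
    intro fuel cur acc _
    cases fuel <;> simp [PySem.Chars.splitOn.go, splitP]
  | cons c t ih =>
    intro fuel cur acc hle
    cases fuel with
    | zero => simp at hle
    | succ f =>
      simp only [PySem.Chars.splitOn.go]
      by_cases hca : c = a
      · subst hca
        simp only [List.isPrefixOf, BEq.rfl, Bool.true_and, if_true]
        rw [show List.drop [c].length (c :: t) = t from rfl]
        rw [ih f [] (cur.reverse :: acc) (by simpa using hle)]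
        obtain ⟨h, tl, hsp⟩ : ∃ h tl, splitP c t = h :: tl := by
          cases hsp : splitP c t with
          | nil => exact absurd hsp (splitP_ne_nil c t)
          | cons h tl => exact ⟨h, tl, rfl⟩
        simp [splitP, hsp]
      · have : [a].isPrefixOf (c :: t) = false := by
          simp [List.isPrefixOf]; exact fun h => absurd h.symm hca
        rw [this]
        simp only [Bool.false_eq_true, if_false]
        rw [ih f (c :: cur) acc (by simpa using hle)]
        obtain ⟨h, tl, hsp⟩ : ∃ h tl, splitP a t = h :: tl := by
          cases hsp : splitP a t with
          | nil => exact absurd hsp (splitP_ne_nil a t)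
          | cons h tl => exact ⟨h, tl, rfl⟩
        simp [splitP, hca, hsp]

lemma splitOn_eq_splitP (s : List Char) (a : Char) :
    PySem.Chars.splitOn s [a] = splitP a s := by
  rw [PySem.Chars.splitOn, splitOn_go_eq_splitP a s (s.length + 1) [] [] (by omega)]
  obtain ⟨h, tl, hsp⟩ : ∃ h tl, splitP a s = h :: tl := by
    cases hsp : splitP a s with
    | nil => exact absurd hsp (splitP_ne_nil a s)
    | cons h tl => exact ⟨h, tl, rfl⟩
  simp [hsp]

-- single-char membership test
lemma isIn_single (a : Char) (l : List Char) :
    PySem.Chars.isIn [a] l = l.any (· = a) := by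
  by_cases h : a ∈ l
  · rw [(PySem.Chars.isIn_iff_infix _ _).mpr ((List.singleton_infix_iff a l).mpr h)]
    exact ((List.any_eq_true).mpr ⟨a, h, by simp⟩).symm
  · rw [(PySem.Chars.isIn_eq_false_iff _ _).mpr
      (fun hin => h ((List.singleton_infix_iff a l).mp hin))]
    simp
    intro x hx hxa
    exact absurd (hxa ▸ hx) h

-- join with a single-char separator, cons form
lemma join_cons_flatten (b : Char) (x : List Char) (xs : List (List Char)) :
    PySem.Chars.join [b] (x :: xs) = x ++ (xs.map (fun l => b :: l)).flatten := by
  induction xs generalizing x with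
  | nil => simp [PySem.Chars.join, List.intercalate]
  | cons y ys ih =>
    have hy := ih y
    simp only [PySem.Chars.join, List.intercalate, List.intersperse, List.map_cons,
      List.flatten_cons] at *
    simp [hy]

-- join (ys ++ [x]) snoc form
lemma join_snoc (b : Char) (ys : List (List Char)) (x : List Char) :
    PySem.Chars.join [b] (ys ++ [x])
      = PySem.Chars.join [b] ys ++ (if ys = [] then [] else [b]) ++ x := by
  induction ys with
  | nil => simp [PySem.Chars.join, List.intercalate]
  | cons y ys ih =>
    cases ys with
    | nil => simp [PySem.Chars.join, List.intercalate]
    | cons z zs =>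
      simp only [PySem.Chars.join, List.intercalate] at *
      simp [List.intersperse] at *
      simp [ih]

-- join-of-split with single-char separators is a character map
lemma splitOn_go_join (a b : Char) :
    ∀ (l : List Char) (fuel : Nat) (cur : List Char) (acc : List (List Char)),
      l.length ≤ fuel →
      PySem.Chars.join [b] (PySem.Chars.splitOn.go [a] fuel l cur acc)
        = PySem.Chars.join [b] acc.reverse ++ (if acc = [] then [] else [b]) ++ cur.reverse
            ++ l.map (fun c => if c = a then b else c) := by
  intro l
  induction l with
  | nil =>
    intro fuel cur acc _
    cases fuel <;>
      · simp only [PySem.Chars.splitOn.go, List.append_nil, List.reverse_cons, List.map_nil]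
        rw [join_snoc]
        simp
  | cons c t ih =>
    intro fuel cur acc hle
    cases fuel with
    | zero => simp at hle
    | succ f =>
      simp only [PySem.Chars.splitOn.go]
      by_cases hca : c = a
      · subst hca
        simp only [List.isPrefixOf, BEq.rfl, Bool.true_and, if_true]
        rw [show List.drop [c].length (c :: t) = t from rfl]
        rw [ih f [] (cur.reverse :: acc) (by simpa using hle)]
        simp only [List.reverse_cons]
        rw [join_snoc]
        simp
      · have : [a].isPrefixOf (c :: t) = false := by
          simp [List.isPrefixOf]; exact fun h => absurd h.symm hca
        rw [this]
        simp only [Bool.false_eq_true, if_false]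
        rw [ih f (c :: cur) acc (by simpa using hle)]
        simp [hca]

lemma join_splitOn_single (s : List Char) (a b : Char) :
    PySem.Chars.join [b] (PySem.Chars.splitOn s [a])
      = s.map (fun c => if c = a then b else c) := by
  simp only [PySem.Chars.splitOn]
  rw [splitOn_go_join a b s (s.length + 1) [] [] (by omega)]
  simp [PySem.Chars.join, List.intercalate]

-- the per-character map both sides compute
def semiMap (c : Char) : Char := if c = ';' then ' ' else c

-- A's loop equals the validate-then-map form over the line list
lemma goA_eq (lines : List (List Char)) :
    ∀ (acc : List (List Char)),
      parseCsvGoA lines acc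
        = if lines.all (fun line => line.any (· = ';')) then
            some (String.ofList (PySem.Chars.join ['\n']
              (acc ++ lines.map (fun line => line.map semiMap ++ [' ', '-', '1']))))
          else none := by
  induction lines with
  | nil => intro acc; simp [parseCsvGoA]
  | cons line rest ih =>
    intro acc
    simp only [parseCsvGoA, List.all_cons, List.map_cons, isIn_single]
    cases h : line.any (· = ';') with
    | false => simp
    | true =>
      simp only [Bool.true_and]
      rw [ih, join_splitOn_single,
        show (fun c => if c = ';' then ' ' else c) = semiMap from rfl]
      simp

-- B's scan equals the same validate-then-map form over splitP of its input
lemma goB_eq (s : List Char) :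
    ∀ (seen : Bool) (acc : List Char),
      parseCsvGoB s seen acc
        = match splitP '\n' s with
          | [] => none
          | first :: rest =>
            if (seen || first.any (· = ';')) && rest.all (fun l => l.any (· = ';')) then
              some (acc ++ first.map semiMap ++ [' ', '-', '1']
                ++ (rest.map (fun l => '\n' :: (l.map semiMap ++ [' ', '-', '1']))).flatten)
            else none := by
  induction s with
  | nil => intro seen acc; cases seen <;> simp [parseCsvGoB, splitP]
  | cons c t ih =>
    intro seen acc
    by_cases hsemi : c = ';'
    · subst hsemi
      simp only [parseCsvGoB, if_true, splitP, if_neg (by decide : ¬ (';' = '\n'))]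
      rw [ih true (acc ++ [' '])]
      obtain ⟨h, tl, hsp⟩ : ∃ h tl, splitP '\n' t = h :: tl := by
        cases hsp : splitP '\n' t with
        | nil => exact absurd hsp (splitP_ne_nil _ t)
        | cons h tl => exact ⟨h, tl, rfl⟩
      simp [hsp, semiMap]
    · by_cases hnl : c = '\n'
      · subst hnl
        simp only [parseCsvGoB, if_neg (by decide : ¬ ('\n' = ';')), if_true, splitP]
        cases seen with
        | false =>
          simp only [Bool.false_eq_true, if_false, Bool.false_or]
          obtain ⟨h, tl, hsp⟩ : ∃ h tl, splitP '\n' t = h :: tl := by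
            cases hsp : splitP '\n' t with
            | nil => exact absurd hsp (splitP_ne_nil _ t)
            | cons h tl => exact ⟨h, tl, rfl⟩
          simp [hsp]
        | true =>
          simp only [if_true]
          rw [ih false (acc ++ [' ', '-', '1', '\n'])]
          obtain ⟨h, tl, hsp⟩ : ∃ h tl, splitP '\n' t = h :: tl := by
            cases hsp : splitP '\n' t with
            | nil => exact absurd hsp (splitP_ne_nil _ t)
            | cons h tl => exact ⟨h, tl, rfl⟩
          simp [hsp]
      · simp only [parseCsvGoB, if_neg hsemi, if_neg hnl, splitP]
        rw [ih seen (acc ++ [c])]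
        obtain ⟨h, tl, hsp⟩ : ∃ h tl, splitP '\n' t = h :: tl := by
          cases hsp : splitP '\n' t with
          | nil => exact absurd hsp (splitP_ne_nil _ t)
          | cons h tl => exact ⟨h, tl, rfl⟩
        simp [hsp, semiMap, hsemi]

-- ===== VERDICT (by name: the statement is the Claim_ definition above) =====
theorem parse_csv_semicolon_py_spec : Claim_equal_parse_csv_semicolon_py := by
  intro content_str _
  unfold Spec_parse_csv_semicolon_py parse_csv_semicolon_py parse_csv_semicolon_py_alt
  simp only []
  set s := PySem.Chars.strip content_str.toList with hs
  obtain ⟨first, rest, hsp⟩ : ∃ first rest, splitP '\n' s = first :: rest := by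
    cases hsp : splitP '\n' s with
    | nil => exact absurd hsp (splitP_ne_nil _ s)
    | cons h tl => exact ⟨h, tl, rfl⟩
  rw [splitOn_eq_splitP, hsp]
  rw [if_neg (by simp)]
  rw [goA_eq, goB_eq, hsp]
  simp only [List.all_cons, Bool.false_or, List.nil_append, List.map_cons]
  cases hcond : (first.any (· = ';') && rest.all fun l => l.any (· = ';')) with
  | false => simp
  | true =>
    simp only [if_true, Option.map_some]
    rw [join_cons_flatten]
    simp [Function.comp_def]
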